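-- pv_equiv track=rewrite | github.com/qwatro1111/common | tests_practice/homework.py | task_18
-- ===== SOURCE A (Python) =====
-- def task_18(string):
--     """
--     Write a program that will take the str parameter being passed and modify it using
--     the following algorithm. Replace every letter in the string with the letter following
--     it in the alphabet (ie. cbecomes d, zbecomes a). Then capitalize every vowel in
--     this new string (a, e, i, o, u) and finally return this modified string.
--     Input: abcd
--     Output: bcdE
--     """
--     my_string = ""
--     for i in string:
--         if i == 'z':
--             my_string += 'a'
--             continue
--         elif i == 'Z':
--             my_string += 'A'
--             continue
--         my_string += chr(ord(i) + 1)
--     return "".join([i.upper() if i in 'aeiou' else i for i in my_string])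
-- ===== SOURCE B (Python) =====
-- VOWELS = frozenset('aeiou')
--
-- def _transform(c):
--     """Shift one char (+1, wrapping z/Z), then uppercase it if it became a vowel."""
--     if c == 'z':
--         return 'A'  # 'z' -> 'a', a vowel, so uppercased
--     if c == 'Z':
--         return 'A'
--     s = chr(ord(c) + 1)
--     return s.upper() if s in VOWELS else s
--
-- def task_18(string):
--     return ''.join(map(_transform, string))
-- ===== Notes on version B (the rewrite author's own statement) =====
-- stated objective: simpler
-- what changed: A builds an intermediate shifted string in one loop and then runs a second vowel-uppercasing pass over it; B emits each fully transformed character in a single pass with no intermediate string.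
import Mathlib
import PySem

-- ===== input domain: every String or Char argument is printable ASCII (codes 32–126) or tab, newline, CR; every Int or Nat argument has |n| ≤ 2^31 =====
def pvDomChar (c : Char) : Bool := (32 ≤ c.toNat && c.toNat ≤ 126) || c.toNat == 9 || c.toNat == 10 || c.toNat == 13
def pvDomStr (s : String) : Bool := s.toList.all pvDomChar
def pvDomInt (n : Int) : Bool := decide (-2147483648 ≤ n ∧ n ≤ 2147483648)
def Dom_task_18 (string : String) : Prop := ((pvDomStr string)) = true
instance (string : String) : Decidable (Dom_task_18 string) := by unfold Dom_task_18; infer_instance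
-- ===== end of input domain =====

-- B replaces A's two sequential passes (shift all chars, then uppercase vowels) by a
-- single pass emitting each fully transformed character; same values, no speed claim.

-- ===== PORT A =====
-- chr(ord(i)+1) → Char.ofNat (i.toNat + 1); i.upper() on one ASCII char → Char.toUpper (exact on ASCII)
def task_18 (string : String) : String :=
  let my_string : List Char := string.toList.foldl (fun acc i =>
    if i = 'z' then acc ++ ['a']
    else if i = 'Z' then acc ++ ['A']
    else acc ++ [Char.ofNat (i.toNat + 1)]) []
  String.mk (my_string.map (fun i => if i ∈ "aeiou".toList then i.toUpper else i))

-- ===== PORT B =====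
-- Source B's per-char helper _transform, then one map over the input
def task_18_transform (c : Char) : Char :=
  if c = 'z' then 'A'
  else if c = 'Z' then 'A'
  else
    let s := Char.ofNat (c.toNat + 1)
    if s ∈ ['a','e','i','o','u'] then s.toUpper else s

def task_18_alt (string : String) : String :=
  String.mk (string.toList.map task_18_transform)

-- ===== PRECONDITION & SPEC =====
def Spec_task_18 (string : String) (out : String) : Prop := out = task_18_alt string
instance (string : String) (out : String) : Decidable (Spec_task_18 string out) := by unfold Spec_task_18; infer_instance

-- ===== CLAIM (what is proved, stated in full; the proofs are below) =====
def Claim_equal_task_18 : Prop := ∀ (string : String), Dom_task_18 string → Spec_task_18 string (task_18 string)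

-- ===== LEMMAS AND PROOFS =====

-- A's shift step, factored for the proof
def pvShiftA (i : Char) : Char :=
  if i = 'z' then 'a' else if i = 'Z' then 'A' else Char.ofNat (i.toNat + 1)

lemma pvFoldA (l acc : List Char) :
    l.foldl (fun acc i =>
      if i = 'z' then acc ++ ['a']
      else if i = 'Z' then acc ++ ['A']
      else acc ++ [Char.ofNat (i.toNat + 1)]) acc = acc ++ l.map pvShiftA := by
  induction l generalizing acc with
  | nil => simp
  | cons c t ih =>
    simp only [List.foldl, List.map]
    rw [ih]
    unfold pvShiftA
    split_ifs <;> simp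

lemma pvStep (c : Char) :
    (if pvShiftA c ∈ "aeiou".toList then (pvShiftA c).toUpper else pvShiftA c)
      = task_18_transform c := by
  unfold pvShiftA task_18_transform
  split_ifs with h1 h2 <;> simp_all

-- ===== VERDICT (by name: the statement is the Claim_ definition above) =====
theorem task_18_spec : Claim_equal_task_18 := by
  intro s _
  unfold Spec_task_18 task_18 task_18_alt
  rw [pvFoldA]
  simp only [List.nil_append, List.map_map]
  congr 1
  apply List.map_congr_left
  intro c _
  exact pvStep c
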